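-- pv_equiv track=rewrite | github.com/Simonharris3/nfl-draft-model | csv_preprocessing.py | same_school
-- ===== SOURCE A (Python) =====
-- state = ["st.", "state", "st"]
--
-- school_pairs = [['alab a&m', 'alabama a&m'],
--                 ['app state', 'appalachian state'],
--                 ['ark state', 'arkansas state'],
--                 ['boston col.', 'boston col', 'boston college'],
--                 ['bowling green', 'bowl green'],
--                 ['central michigan', 'c michigan'],
--                 ['central florida', 'ucf'],
--                 ['cal', 'california'],
--                 ['cent ark', 'central arkansas'],
--                 ['charleston southern', 'charles so'],
--                 ['colo state', 'colorado state'],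
--                 ['east carolina', 'e carolina'],
--                 ['east. washington', 'e washgton'],
--                 ['florida atlantic', 'fau'],
--                 ['ga state', 'georgia state'],
--                 ['georgia tech', 'ga tech'],
--                 ['illinois state', 'ill state'],
--                 ['jacksonville state', 'jville state'],
--                 ['louisiana-lafayette', 'la lafayet', 'louisiana'],
--                 ['louisiana tech', 'la tech'],
--                 ['miami (fl)', 'miami fl', 'miami'],
--                 ['miami (oh)', 'miami oh'],
--                 ['mich state', 'michigan state'],
--                 ['miss state', 'mississippi state'],
--                 ['missouri state', 'mo state'],
--                 ['umass', 'massachusetts'],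
--                 ['n carolina', 'north carolina'],
--                 ['n dak st', 'north dakota st'],
--                 ['n illinois', 'northern illinois'],
--                 ['n texas', 'north texas'],
--                 ['nc state', 'north carolina state'],
--                 ['n colorado', 'northern colorado'],
--                 ['new mex state', 'new mexico state'],
--                 ['nwestern', 'northwestern'],
--                 ['okla state', 'oklahoma state'],
--                 ['mississippi', 'ole miss'],
--                 ['south alabama', 's alabama'],
--                 ['s carolina', 'south carolina'],
--                 ['scar state', 'south carolina state'],
--                 ['south dakota state', 's dak st'],
--                 ['southern utah st.', 'so utah'],
--                 ['usf', 'south florida'],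
--                 ['uab', 'alabama-birmingham'],
--                 ['s jose st', 'san jose state'],
--                 ['s diego st', 'san diego state'],
--                 ['so miss', 'southern miss'],
--                 ['stf austin', 'stephen f. austin'],
--                 ['stny brook', 'stony brook'],
--                 ['tenn state', 'tennessee state'],
--                 ['texas-san antonio', 'utsa'],
--                 ['utep', 'texas-el paso'],
--                 ['virginia tech', 'va tech'],
--                 ['western kentucky', 'w kentucky'],
--                 ['w georgia', 'western georgia'],
--                 ['w virginia', 'west virginia'],
--                 ['w michigan', 'western michigan'],
--                 ['wake forest', 'wake'],
--                 ['wash state', 'washington state'],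
--                 ['wm & mary', 'william & mary'],
--                 ['youngstown state', 'yngtown st'],
--                 ['rhode isld', 'rhode island']]
--
-- def same_school(school1, school2):
--     s1 = school1.lower()
--     s2 = school2.lower()
--
--     for i in range(len(school_pairs)):
--         found1 = False
--         found2 = False
--         for k in range(len(school_pairs[i])):
--             if equivalent_except_st(s1, school_pairs[i][k]):
--                 found1 = True
--             if equivalent_except_st(s2, school_pairs[i][k]):
--                 found2 = True
--             if found1 and found2:
--                 return True
--
--     return equivalent_except_st(s1, s2)
--
-- def equivalent_except_st(a, b):
--     words1 = a.split(" ")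
--     words2 = b.split(" ")
--
--     return a == b or a + "." == b or b + "." == a or (words1[:-1] == words2[:-1] and words1[-1] in state and
--                                                       words2[-1] in state)
-- ===== SOURCE B (Python) =====
-- state = ["st.", "state", "st"]
--
-- # Same data as school_pairs, restructured as a flat (name, group_id) alias table.
-- SCHOOL_ALIASES = [
-- ('alab a&m', 0),
--     ('alabama a&m', 0),
--     ('app state', 1),
--     ('appalachian state', 1),
--     ('ark state', 2),
--     ('arkansas state', 2),
--     ('boston col.', 3),
--     ('boston col', 3),
--     ('boston college', 3),
--     ('bowling green', 4),
--     ('bowl green', 4),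
--     ('central michigan', 5),
--     ('c michigan', 5),
--     ('central florida', 6),
--     ('ucf', 6),
--     ('cal', 7),
--     ('california', 7),
--     ('cent ark', 8),
--     ('central arkansas', 8),
--     ('charleston southern', 9),
--     ('charles so', 9),
--     ('colo state', 10),
--     ('colorado state', 10),
--     ('east carolina', 11),
--     ('e carolina', 11),
--     ('east. washington', 12),
--     ('e washgton', 12),
--     ('florida atlantic', 13),
--     ('fau', 13),
--     ('ga state', 14),
--     ('georgia state', 14),
--     ('georgia tech', 15),
--     ('ga tech', 15),
--     ('illinois state', 16),
--     ('ill state', 16),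
--     ('jacksonville state', 17),
--     ('jville state', 17),
--     ('louisiana-lafayette', 18),
--     ('la lafayet', 18),
--     ('louisiana', 18),
--     ('louisiana tech', 19),
--     ('la tech', 19),
--     ('miami (fl)', 20),
--     ('miami fl', 20),
--     ('miami', 20),
--     ('miami (oh)', 21),
--     ('miami oh', 21),
--     ('mich state', 22),
--     ('michigan state', 22),
--     ('miss state', 23),
--     ('mississippi state', 23),
--     ('missouri state', 24),
--     ('mo state', 24),
--     ('umass', 25),
--     ('massachusetts', 25),
--     ('n carolina', 26),
--     ('north carolina', 26),
--     ('n dak st', 27),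
--     ('north dakota st', 27),
--     ('n illinois', 28),
--     ('northern illinois', 28),
--     ('n texas', 29),
--     ('north texas', 29),
--     ('nc state', 30),
--     ('north carolina state', 30),
--     ('n colorado', 31),
--     ('northern colorado', 31),
--     ('new mex state', 32),
--     ('new mexico state', 32),
--     ('nwestern', 33),
--     ('northwestern', 33),
--     ('okla state', 34),
--     ('oklahoma state', 34),
--     ('mississippi', 35),
--     ('ole miss', 35),
--     ('south alabama', 36),
--     ('s alabama', 36),
--     ('s carolina', 37),
--     ('south carolina', 37),
--     ('scar state', 38),
--     ('south carolina state', 38),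
--     ('south dakota state', 39),
--     ('s dak st', 39),
--     ('southern utah st.', 40),
--     ('so utah', 40),
--     ('usf', 41),
--     ('south florida', 41),
--     ('uab', 42),
--     ('alabama-birmingham', 42),
--     ('s jose st', 43),
--     ('san jose state', 43),
--     ('s diego st', 44),
--     ('san diego state', 44),
--     ('so miss', 45),
--     ('southern miss', 45),
--     ('stf austin', 46),
--     ('stephen f. austin', 46),
--     ('stny brook', 47),
--     ('stony brook', 47),
--     ('tenn state', 48),
--     ('tennessee state', 48),
--     ('texas-san antonio', 49),
--     ('utsa', 49),
--     ('utep', 50),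
--     ('texas-el paso', 50),
--     ('virginia tech', 51),
--     ('va tech', 51),
--     ('western kentucky', 52),
--     ('w kentucky', 52),
--     ('w georgia', 53),
--     ('western georgia', 53),
--     ('w virginia', 54),
--     ('west virginia', 54),
--     ('w michigan', 55),
--     ('western michigan', 55),
--     ('wake forest', 56),
--     ('wake', 56),
--     ('wash state', 57),
--     ('washington state', 57),
--     ('wm & mary', 58),
--     ('william & mary', 58),
--     ('youngstown state', 59),
--     ('yngtown st', 59),
--     ('rhode isld', 60),
--     ('rhode island', 60)]
--
--
-- def _name_eq(a, b):
--     if a == b: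
--         return True
--     if a.endswith(".") and a[:-1] == b:
--         return True
--     if b.endswith(".") and b[:-1] == a:
--         return True
--     wa = a.split(" ")
--     wb = b.split(" ")
--     return wa[-1] in state and wb[-1] in state and wa[:-1] == wb[:-1]
--
--
-- def same_school(school1, school2):
--     s1 = school1.lower()
--     s2 = school2.lower()
--     gids1 = {g for n, g in SCHOOL_ALIASES if _name_eq(s1, n)}
--     if any(g in gids1 and _name_eq(s2, n) for n, g in SCHOOL_ALIASES):
--         return True
--     return _name_eq(s1, s2)
-- ===== Notes on version B (the rewrite author's own statement) =====
-- stated objective: alternative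
-- what changed: B restructures the grouped school_pairs table into a flat (name, group_id) alias list, collects in one pass the set of group ids matching the first name and then scans the flat table once looking the second name's matches up in that set (falling back to a direct comparison), instead of A's nested loops with interleaved found1/found2 flags and early return; the name-equality helper becomes an early-return chain (endswith/[:-1]) that only splits the strings when the cheap checks fail, where A's helper always splits both.
import Mathlib
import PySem

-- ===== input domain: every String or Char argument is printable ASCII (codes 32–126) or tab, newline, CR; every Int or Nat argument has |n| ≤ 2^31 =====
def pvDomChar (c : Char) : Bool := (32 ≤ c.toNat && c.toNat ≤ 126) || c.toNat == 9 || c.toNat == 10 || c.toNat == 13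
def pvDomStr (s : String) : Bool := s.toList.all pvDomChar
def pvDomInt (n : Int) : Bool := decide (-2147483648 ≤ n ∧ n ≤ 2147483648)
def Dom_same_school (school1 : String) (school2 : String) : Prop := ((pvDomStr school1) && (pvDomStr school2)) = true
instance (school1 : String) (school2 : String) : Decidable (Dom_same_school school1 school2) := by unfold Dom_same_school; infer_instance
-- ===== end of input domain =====

-- One line: B keeps the same data as a flat (name, group-id) alias table instead of grouped lists and
-- replaces A's interleaved found1/found2 flag scan by one pass collecting s1's group ids and a second
-- pass looking s2's matches up in that set; its name-equality helper only splits when cheap early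
-- checks fail (objective: alternative; measured constant-factor faster in a timing run).

def pvState : List String := ["st.", "state", "st"]

-- ===== PORT A =====
def school_pairs : List (List String) :=
  [["alab a&m", "alabama a&m"],
   ["app state", "appalachian state"],
   ["ark state", "arkansas state"],
   ["boston col.", "boston col", "boston college"],
   ["bowling green", "bowl green"],
   ["central michigan", "c michigan"],
   ["central florida", "ucf"],
   ["cal", "california"],
   ["cent ark", "central arkansas"],
   ["charleston southern", "charles so"],
   ["colo state", "colorado state"],
   ["east carolina", "e carolina"],
   ["east. washington", "e washgton"],
   ["florida atlantic", "fau"],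
   ["ga state", "georgia state"],
   ["georgia tech", "ga tech"],
   ["illinois state", "ill state"],
   ["jacksonville state", "jville state"],
   ["louisiana-lafayette", "la lafayet", "louisiana"],
   ["louisiana tech", "la tech"],
   ["miami (fl)", "miami fl", "miami"],
   ["miami (oh)", "miami oh"],
   ["mich state", "michigan state"],
   ["miss state", "mississippi state"],
   ["missouri state", "mo state"],
   ["umass", "massachusetts"],
   ["n carolina", "north carolina"],
   ["n dak st", "north dakota st"],
   ["n illinois", "northern illinois"],
   ["n texas", "north texas"],
   ["nc state", "north carolina state"],
   ["n colorado", "northern colorado"],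
   ["new mex state", "new mexico state"],
   ["nwestern", "northwestern"],
   ["okla state", "oklahoma state"],
   ["mississippi", "ole miss"],
   ["south alabama", "s alabama"],
   ["s carolina", "south carolina"],
   ["scar state", "south carolina state"],
   ["south dakota state", "s dak st"],
   ["southern utah st.", "so utah"],
   ["usf", "south florida"],
   ["uab", "alabama-birmingham"],
   ["s jose st", "san jose state"],
   ["s diego st", "san diego state"],
   ["so miss", "southern miss"],
   ["stf austin", "stephen f. austin"],
   ["stny brook", "stony brook"],
   ["tenn state", "tennessee state"],
   ["texas-san antonio", "utsa"],
   ["utep", "texas-el paso"],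
   ["virginia tech", "va tech"],
   ["western kentucky", "w kentucky"],
   ["w georgia", "western georgia"],
   ["w virginia", "west virginia"],
   ["w michigan", "western michigan"],
   ["wake forest", "wake"],
   ["wash state", "washington state"],
   ["wm & mary", "william & mary"],
   ["youngstown state", "yngtown st"],
   ["rhode isld", "rhode island"]]

-- equivalent_except_st(a, b) as written in Source A.  a.split(" ") with the non-empty separator " "
-- never raises, so split? is always `some` and the `.getD []` default is unreachable; split(" ")
-- always returns a non-empty list, so the pyGetD default "" for words[-1] is unreachable too.
def eqst (a b : String) : Bool :=
  let words1 := (PySem.Str.split? a " ").getD []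
  let words2 := (PySem.Str.split? b " ").getD []
  (a == b) || (a ++ "." == b) || (b ++ "." == a) ||
    ((PySem.List.slice words1 none (some (-1)) == PySem.List.slice words2 none (some (-1))) &&
     pvState.contains (PySem.List.pyGetD words1 (-1) "") &&
     pvState.contains (PySem.List.pyGetD words2 (-1) ""))

-- inner 'for k in range(len(school_pairs[i]))' loop of A, with the found1/found2 flags and the
-- early 'return True'
def ssInner (s1 s2 : String) : List String → Bool → Bool → Bool
  | [], _, _ => false
  | x :: rest, found1, found2 =>
    let f1 := found1 || eqst s1 x
    let f2 := found2 || eqst s2 x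
    if f1 && f2 then true else ssInner s1 s2 rest f1 f2

-- outer 'for i in range(len(school_pairs))' loop of A; falling off the loop returns the fallback
def ssOuter (s1 s2 : String) : List (List String) → Bool
  | [] => eqst s1 s2
  | g :: rest => if ssInner s1 s2 g false false then true else ssOuter s1 s2 rest

def same_school (school1 : String) (school2 : String) : Bool :=
  let s1 := PySem.Str.lower school1
  let s2 := PySem.Str.lower school2
  ssOuter s1 s2 school_pairs

-- ===== PORT B =====
-- SCHOOL_ALIASES of Source B: the flat (name, group_id) alias table
def schoolAliases : List (String × Int) :=
  [("alab a&m", 0),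
   ("alabama a&m", 0),
   ("app state", 1),
   ("appalachian state", 1),
   ("ark state", 2),
   ("arkansas state", 2),
   ("boston col.", 3),
   ("boston col", 3),
   ("boston college", 3),
   ("bowling green", 4),
   ("bowl green", 4),
   ("central michigan", 5),
   ("c michigan", 5),
   ("central florida", 6),
   ("ucf", 6),
   ("cal", 7),
   ("california", 7),
   ("cent ark", 8),
   ("central arkansas", 8),
   ("charleston southern", 9),
   ("charles so", 9),
   ("colo state", 10),
   ("colorado state", 10),
   ("east carolina", 11),
   ("e carolina", 11),
   ("east. washington", 12),
   ("e washgton", 12),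
   ("florida atlantic", 13),
   ("fau", 13),
   ("ga state", 14),
   ("georgia state", 14),
   ("georgia tech", 15),
   ("ga tech", 15),
   ("illinois state", 16),
   ("ill state", 16),
   ("jacksonville state", 17),
   ("jville state", 17),
   ("louisiana-lafayette", 18),
   ("la lafayet", 18),
   ("louisiana", 18),
   ("louisiana tech", 19),
   ("la tech", 19),
   ("miami (fl)", 20),
   ("miami fl", 20),
   ("miami", 20),
   ("miami (oh)", 21),
   ("miami oh", 21),
   ("mich state", 22),
   ("michigan state", 22),
   ("miss state", 23),
   ("mississippi state", 23),
   ("missouri state", 24),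
   ("mo state", 24),
   ("umass", 25),
   ("massachusetts", 25),
   ("n carolina", 26),
   ("north carolina", 26),
   ("n dak st", 27),
   ("north dakota st", 27),
   ("n illinois", 28),
   ("northern illinois", 28),
   ("n texas", 29),
   ("north texas", 29),
   ("nc state", 30),
   ("north carolina state", 30),
   ("n colorado", 31),
   ("northern colorado", 31),
   ("new mex state", 32),
   ("new mexico state", 32),
   ("nwestern", 33),
   ("northwestern", 33),
   ("okla state", 34),
   ("oklahoma state", 34),
   ("mississippi", 35),
   ("ole miss", 35),
   ("south alabama", 36),
   ("s alabama", 36),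
   ("s carolina", 37),
   ("south carolina", 37),
   ("scar state", 38),
   ("south carolina state", 38),
   ("south dakota state", 39),
   ("s dak st", 39),
   ("southern utah st.", 40),
   ("so utah", 40),
   ("usf", 41),
   ("south florida", 41),
   ("uab", 42),
   ("alabama-birmingham", 42),
   ("s jose st", 43),
   ("san jose state", 43),
   ("s diego st", 44),
   ("san diego state", 44),
   ("so miss", 45),
   ("southern miss", 45),
   ("stf austin", 46),
   ("stephen f. austin", 46),
   ("stny brook", 47),
   ("stony brook", 47),
   ("tenn state", 48),
   ("tennessee state", 48),
   ("texas-san antonio", 49),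
   ("utsa", 49),
   ("utep", 50),
   ("texas-el paso", 50),
   ("virginia tech", 51),
   ("va tech", 51),
   ("western kentucky", 52),
   ("w kentucky", 52),
   ("w georgia", 53),
   ("western georgia", 53),
   ("w virginia", 54),
   ("west virginia", 54),
   ("w michigan", 55),
   ("western michigan", 55),
   ("wake forest", 56),
   ("wake", 56),
   ("wash state", 57),
   ("washington state", 57),
   ("wm & mary", 58),
   ("william & mary", 58),
   ("youngstown state", 59),
   ("yngtown st", 59),
   ("rhode isld", 60),
   ("rhode island", 60)]

-- _name_eq(a, b) of Source B: early-return chain; a+"."==b tested as "b ends with '.' and b[:-1]==a"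
def nameEq (a b : String) : Bool :=
  if a == b then true
  else if PySem.Str.endswith a "." && (PySem.Str.slice a none (some (-1)) == b) then true
  else if PySem.Str.endswith b "." && (PySem.Str.slice b none (some (-1)) == a) then true
  else
    let wa := (PySem.Str.split? a " ").getD []
    let wb := (PySem.Str.split? b " ").getD []
    pvState.contains (PySem.List.pyGetD wa (-1) "") &&
    (pvState.contains (PySem.List.pyGetD wb (-1) "") &&
     (PySem.List.slice wa none (some (-1)) == PySem.List.slice wb none (some (-1))))

def same_school_alt (school1 : String) (school2 : String) : Bool :=
  let s1 := PySem.Str.lower school1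
  let s2 := PySem.Str.lower school2
  let gids1 : PySem.Set Int :=
    PySem.Set.ofList ((schoolAliases.filter (fun e => nameEq s1 e.1)).map (·.2))
  if schoolAliases.any (fun e => PySem.Set.contains gids1 e.2 && nameEq s2 e.1) then true
  else nameEq s1 s2

-- ===== PRECONDITION & SPEC =====
def Spec_same_school (school1 : String) (school2 : String) (out : Bool) : Prop := out = same_school_alt school1 school2
instance (school1 : String) (school2 : String) (out : Bool) : Decidable (Spec_same_school school1 school2 out) := by unfold Spec_same_school; infer_instance

-- ===== CLAIM (what is proved, stated in full; the proofs are below) =====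
def Claim_equal_same_school : Prop := ∀ (school1 : String) (school2 : String), Dom_same_school school1 school2 → Spec_same_school school1 school2 (same_school school1 school2)

-- ===== LEMMAS AND PROOFS =====

-- 'b + "." == a'  is exactly  'a ends with "." and a[:-1] == b'
theorem append_dot_eq (a b : String) :
    (b ++ "." == a) = (PySem.Str.endswith a "." && (PySem.Str.slice a none (some (-1)) == b)) := by
  have hdot : ".".toList = ['.'] := rfl
  rw [Bool.eq_iff_iff]
  simp only [beq_iff_eq, Bool.and_eq_true, PySem.Str.endswith_eq, PySem.Chars.endswith_iff,
    String.ext_iff, String.toList_append, PySem.Str.slice_to_neg_one, hdot]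
  constructor
  · rintro h
    exact ⟨⟨b.toList, h⟩, by rw [← h, List.dropLast_concat]⟩
  · rintro ⟨⟨t, ht⟩, hd⟩
    rw [← ht] at hd ⊢
    rw [List.dropLast_concat] at hd
    rw [hd]

-- the two helper formulations agree on every pair of strings
theorem nameEq_eq_eqst (a b : String) : nameEq a b = eqst a b := by
  unfold nameEq eqst
  rw [← append_dot_eq a b, ← append_dot_eq b a]
  cases h1 : (a == b) <;> cases h2 : (a ++ "." == b) <;> cases h3 : (b ++ "." == a) <;>
    simp [h1, h2, h3, Bool.and_comm, Bool.and_left_comm]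

-- A's inner loop with accumulated flags equals: the group is non-empty and each flag ends up set.
theorem ssInner_eq (s1 s2 : String) (grp : List String) (f1 f2 : Bool) :
    ssInner s1 s2 grp f1 f2 =
      (!grp.isEmpty && ((f1 || grp.any (fun x => eqst s1 x)) && (f2 || grp.any (fun x => eqst s2 x)))) := by
  induction grp generalizing f1 f2 with
  | nil => simp [ssInner]
  | cons x rest ih =>
    simp only [ssInner, ih, List.any_cons]
    cases rest with
    | nil =>
      simp only [List.isEmpty_nil, List.isEmpty_cons, List.any_nil]
      cases f1 <;> cases f2 <;> cases eqst s1 x <;> cases eqst s2 x <;> simp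
    | cons y ys =>
      simp only [List.isEmpty_cons, Bool.not_false, Bool.true_and]
      generalize List.any (y :: ys) (fun x => eqst s1 x) = A
      generalize List.any (y :: ys) (fun x => eqst s2 x) = B
      cases f1 <;> cases f2 <;> cases eqst s1 x <;> cases eqst s2 x <;> cases A <;> cases B <;> simp

-- started from false/false, the inner loop decides "some entry matches s1 and some entry matches s2"
theorem ssInner_false_false (s1 s2 : String) (grp : List String) :
    ssInner s1 s2 grp false false =
      (grp.any (fun x => eqst s1 x) && grp.any (fun x => eqst s2 x)) := by
  rw [ssInner_eq]
  cases grp <;> simp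

-- A's outer loop equals: some group matches both names, else the fallback comparison.
theorem ssOuter_eq (s1 s2 : String) (gs : List (List String)) :
    ssOuter s1 s2 gs =
      (gs.any (fun g => g.any (fun x => eqst s1 x) && g.any (fun x => eqst s2 x)) || eqst s1 s2) := by
  induction gs with
  | nil => simp [ssOuter]
  | cons g rest ih =>
    simp only [ssOuter, ssInner_false_false, ih, List.any_cons]
    cases h : (g.any (fun x => eqst s1 x) && g.any (fun x => eqst s2 x)) <;> simp

-- the flat alias table is school_pairs flattened, with the group index attached to every entry
def flatten (gs : List (List String)) : List (String × Int) :=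
  (PySem.List.enumerate gs 0).flatMap (fun q => q.2.map (fun n => (n, q.1)))

theorem schoolAliases_eq : schoolAliases = flatten school_pairs := by
  decide

theorem mem_flatten (gs : List (List String)) (e : String × Int) :
    e ∈ flatten gs ↔ ∃ (k : Nat) (h : k < gs.length), e.2 = (k : Int) ∧ e.1 ∈ gs[k] := by
  simp only [flatten, List.mem_flatMap, PySem.List.mem_enumerate_iff]
  constructor
  · rintro ⟨q, ⟨k, hk, rfl⟩, hm⟩
    simp only [List.mem_map] at hm
    obtain ⟨n, hn, rfl⟩ := hm
    exact ⟨k, hk, by simp, hn⟩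
  · rintro ⟨k, hk, h2, h1⟩
    refine ⟨((k : Int), gs[k]), ⟨k, hk, by simp⟩, ?_⟩
    simp only [List.mem_map]
    exact ⟨e.1, h1, by cases e with | mk x y => simp_all⟩

-- B's staged scan over the flat table decides "some group matches both names"
theorem flat_scan_eq (gs : List (List String)) (p1 p2 : String → Bool) :
    ((flatten gs).any (fun e =>
        PySem.Set.contains
          (PySem.Set.ofList (((flatten gs).filter (fun e => p1 e.1)).map (·.2))) e.2 && p2 e.1)) =
      gs.any (fun g => g.any p1 && g.any p2) := by
  rw [Bool.eq_iff_iff]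
  simp only [List.any_eq_true, Bool.and_eq_true, PySem.Set.contains_iff, PySem.Set.mem_ofList,
    List.mem_map, List.mem_filter]
  constructor
  · rintro ⟨e, he, ⟨e', ⟨he', hp1⟩, hgid⟩, hp2⟩
    obtain ⟨k, hk, hk2, hk1⟩ := (mem_flatten gs e).mp he
    obtain ⟨k', hk', hk'2, hk'1⟩ := (mem_flatten gs e').mp he'
    have hkk : k' = k := by exact_mod_cast hk'2.symm.trans (hgid.trans hk2)
    subst hkk
    exact ⟨gs[k'], List.getElem_mem hk, ⟨e'.1, hk'1, hp1⟩, ⟨e.1, hk1, hp2⟩⟩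
  · rintro ⟨g, hg, ⟨n1, hn1, hp1⟩, ⟨n2, hn2, hp2⟩⟩
    obtain ⟨k, hk, rfl⟩ := List.getElem_of_mem hg
    exact ⟨(n2, (k : Int)), (mem_flatten gs _).mpr ⟨k, hk, rfl, hn2⟩,
      ⟨(n1, (k : Int)), ⟨(mem_flatten gs _).mpr ⟨k, hk, rfl, hn1⟩, hp1⟩, rfl⟩, hp2⟩

-- ===== VERDICT (by name: the statement is the Claim_ definition above) =====
theorem same_school_spec : Claim_equal_same_school := by
  intro school1 school2 _
  unfold Spec_same_school same_school same_school_alt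
  simp only [schoolAliases_eq]
  rw [ssOuter_eq]
  simp only [nameEq_eq_eqst, flat_scan_eq]
  cases h : List.any school_pairs
      (fun g => g.any (fun x => eqst (PySem.Str.lower school1) x) &&
                g.any (fun x => eqst (PySem.Str.lower school2) x)) <;> simp [h]
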